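-- pv_equiv track=rewrite | github.com/MuciferTheCat/UL-FRI | 2. letnik/TIS/Domače naloge/tis-naloga1/naloga1.py | vecinskiRazred
-- ===== SOURCE A (Python) =====
-- from collections import Counter
--
-- def vecinskiRazred(ji, razred):
--
--     tocni = 0
--
--     for _, indeksi in ji.items():
--         temp = []
--         for k in indeksi:
--             temp.append(razred[k])
--
--         counter = Counter(temp)
--         vecinski = counter.most_common(1)
--
--         for i in indeksi:
--             if razred[i] == vecinski[0][0]:
--                 tocni += 1
--
--     return tocni
-- ===== SOURCE B (Python) =====
-- def vecinskiRazred(ji, razred):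
--     tocni = 0
--     for indeksi in ji.values():
--         tocni += _mode_count([razred[k] for k in indeksi])
--     return tocni
--
-- def _mode_count(lst):
--     # majority-class size by divide-and-conquer over distinct values:
--     # the first value's multiplicity is len(lst) - len(rest); recurse on the rest
--     if not lst:
--         return 0
--     rest = [y for y in lst if y != lst[0]]
--     return max(len(lst) - len(rest), _mode_count(rest))
-- ===== Notes on version B (the rewrite author's own statement) =====
-- stated objective: alternative
-- what changed: B drops the Counter/most_common/rescan machinery entirely: per group it computes the majority-class size by a partition recursion over distinct values (multiplicity of the head via length difference after filtering it out, then recurse on the remainder) and sums these.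
import Mathlib
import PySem

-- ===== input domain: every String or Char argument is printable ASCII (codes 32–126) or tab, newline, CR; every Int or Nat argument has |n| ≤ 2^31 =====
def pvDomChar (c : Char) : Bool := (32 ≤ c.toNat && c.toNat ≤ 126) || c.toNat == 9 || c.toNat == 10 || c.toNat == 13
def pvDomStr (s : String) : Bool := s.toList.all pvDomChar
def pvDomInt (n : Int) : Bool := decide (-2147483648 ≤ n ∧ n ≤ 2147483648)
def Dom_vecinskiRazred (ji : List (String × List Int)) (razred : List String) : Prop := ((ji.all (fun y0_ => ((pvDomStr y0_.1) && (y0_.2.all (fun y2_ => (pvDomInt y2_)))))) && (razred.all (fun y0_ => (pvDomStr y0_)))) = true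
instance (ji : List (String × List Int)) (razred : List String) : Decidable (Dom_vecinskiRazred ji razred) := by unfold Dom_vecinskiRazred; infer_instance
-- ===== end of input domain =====

-- B replaces A's Counter/most_common/rescan per group by a partition recursion over distinct
-- class values (head's multiplicity via length difference after filtering it out, recurse on
-- the rest), summed over groups; objective: alternative.


-- ===== PORT A =====
-- 'for _, indeksi in ji.items()' with the running total; razred[k] is pyGetD (exact under
-- Pre_'s InRange); Counter(temp) is PySem.Dict.counter; most_common(1) is [first item with
-- maximal count] (CPython keeps the first of tied items), rendered as max? over the counter's
-- items keyed by count; A only reads vecinski[0] inside the loop over indeksi, which is empty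
-- exactly when the counter is (hence the match).
def vecinskiRazred (ji : List (String × List Int)) (razred : List String) : Int :=
  ji.foldl (fun tocni g =>
    let temp := g.2.foldl (fun acc k => acc ++ [PySem.List.pyGetD razred k ""]) []
    let counter := PySem.Dict.counter temp
    match PySem.List.max? counter.items (fun p => p.2) with
    | none => tocni
    | some m => g.2.foldl (fun t i => if PySem.List.pyGetD razred i "" = m.1 then t + 1 else t) tocni) 0

-- ===== PORT B =====
-- _mode_count: if not lst: 0; rest = [y for y in lst if y != lst[0]]; max(len-len(rest), rec)
def modeCount : List String → Int
  | [] => 0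
  | x :: xs =>
    let rest := (x :: xs).filter (fun y => y ≠ x)
    max (((x :: xs).length : Int) - (rest.length : Int)) (modeCount rest)
  termination_by l => l.length
  decreasing_by
    simp only [List.filter_cons, ne_eq, not_true_eq_false, decide_false,
      Bool.false_eq_true, if_false, List.length_cons]
    exact Nat.lt_succ_of_le (List.length_filter_le _ _)

-- tocni = 0; for indeksi in ji.values(): tocni += _mode_count([razred[k] for k in indeksi])
def vecinskiRazred_alt (ji : List (String × List Int)) (razred : List String) : Int :=
  ji.foldl (fun tocni g => tocni + modeCount (g.2.map (fun k => PySem.List.pyGetD razred k ""))) 0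

-- ===== PRECONDITION & SPEC =====
-- Pre_ excludes (a) indices outside [-len(razred), len(razred)), where A raises IndexError, and
-- (b) duplicate keys in ji, which a Python dict cannot carry (the assoc list then has no dict
-- counterpart: Python would merge the entries, the port iterates them all).
def Pre_vecinskiRazred (ji : List (String × List Int)) (razred : List String) : Prop :=
  (ji.map Prod.fst).Nodup ∧ ∀ g ∈ ji, ∀ k ∈ g.2, PySem.Raise.InRange razred.length k
instance (ji : List (String × List Int)) (razred : List String) : Decidable (Pre_vecinskiRazred ji razred) := by unfold Pre_vecinskiRazred; infer_instance

def pvWitness_vecinskiRazred : (List (String × List Int)) × List String :=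
  ([("g1", [0, 1, 0]), ("g2", [-1, 2])], ["a", "b", "a"])

def Spec_vecinskiRazred (ji : List (String × List Int)) (razred : List String) (out : Int) : Prop := out = vecinskiRazred_alt ji razred
instance (ji : List (String × List Int)) (razred : List String) (out : Int) : Decidable (Spec_vecinskiRazred ji razred out) := by unfold Spec_vecinskiRazred; infer_instance

-- ===== CLAIM (what is proved, stated in full; the proofs are below) =====
def Claim_equal_vecinskiRazred : Prop := ∀ (ji : List (String × List Int)) (razred : List String), Dom_vecinskiRazred ji razred → Pre_vecinskiRazred ji razred → Spec_vecinskiRazred ji razred (vecinskiRazred ji razred)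

-- ===== LEMMAS AND PROOFS =====

-- Nat bookkeeping for the partition step: multiplicity of x + size of the rest = size of l.
theorem count_add_filter_length (x : String) (l : List String) :
    l.count x + (l.filter (fun y => y ≠ x)).length = l.length := by
  induction l with
  | nil => rfl
  | cons a t ih =>
    by_cases h : a = x
    · subst h
      rw [List.count_cons_self, List.filter_cons_of_neg (by simp), List.length_cons]
      omega
    · rw [List.count_cons_of_ne h, List.filter_cons_of_pos (by simp [h]),
        List.length_cons, List.length_cons]
      omega

-- Filtering x out preserves every other multiplicity.
theorem count_filter_ne (x y : String) (h : y ≠ x) (l : List String) :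
    (l.filter (fun z => z ≠ x)).count y = l.count y := by
  induction l with
  | nil => rfl
  | cons a t ih =>
    by_cases hax : a = x
    · subst hax
      rw [List.filter_cons_of_neg (by simp), ih, List.count_cons_of_ne (Ne.symm h)]
    · rw [List.filter_cons_of_pos (by simp [hax])]
      by_cases hay : a = y
      · subst hay
        rw [List.count_cons_self, List.count_cons_self, ih]
      · rw [List.count_cons_of_ne hay, List.count_cons_of_ne hay, ih]

theorem modeCount_cons (x : String) (xs : List String) :
    modeCount (x :: xs) =
      max (((x :: xs).length : Int) - (((x :: xs).filter (fun y => y ≠ x)).length : Int))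
        (modeCount ((x :: xs).filter (fun y => y ≠ x))) := by
  rw [modeCount]

-- modeCount l is an upper bound on every multiplicity in l …
theorem modeCount_bound' (n : Nat) : ∀ (l : List String), l.length ≤ n →
    ∀ y ∈ l, (l.count y : Int) ≤ modeCount l := by
  induction n with
  | zero =>
    intro l hl y hy
    rw [List.length_eq_zero_iff.mp (Nat.le_zero.mp hl)] at hy
    cases hy
  | succ n ih =>
    intro l hl y hy
    cases l with
    | nil => cases hy
    | cons x xs =>
      rw [modeCount_cons]
      have hcf := count_add_filter_length x (x :: xs)
      have hlen : (x :: xs).length = xs.length + 1 := by simp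
      have hx : (x :: xs).count x ≥ 1 := by simp
      have hlt : ((x :: xs).filter (fun y => y ≠ x)).length ≤ n := by
        simp only [List.length_cons] at hl
        omega
      by_cases hyx : y = x
      · subst hyx
        have hh : ((y :: xs).count y : Int)
            = ((y :: xs).length : Int) - (((y :: xs).filter (fun z => z ≠ y)).length : Int) := by
          omega
        rw [hh]; exact le_max_left _ _
      · rcases List.mem_cons.mp hy with h | h
        · exact absurd h hyx
        · have hyr : y ∈ (x :: xs).filter (fun z => z ≠ x) :=
            List.mem_filter.mpr ⟨hy, by simp [hyx]⟩
          have := ih ((x :: xs).filter (fun z => z ≠ x)) hlt y hyr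
          rw [← count_filter_ne x y hyx]
          exact le_trans this (le_max_right _ _)

-- … and is attained by some element of l when l is nonempty.
theorem modeCount_attained' (n : Nat) : ∀ (l : List String), l.length ≤ n →
    l = [] ∨ ∃ y ∈ l, (l.count y : Int) = modeCount l := by
  induction n with
  | zero =>
    intro l hl
    exact Or.inl (List.length_eq_zero_iff.mp (Nat.le_zero.mp hl))
  | succ n ih =>
    intro l hl
    cases l with
    | nil => exact Or.inl rfl
    | cons x xs =>
      refine Or.inr ?_
      rw [modeCount_cons]
      have hcf := count_add_filter_length x (x :: xs)
      have hlen : (x :: xs).length = xs.length + 1 := by simp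
      have hx1 : (x :: xs).count x ≥ 1 := by simp
      have hlt : ((x :: xs).filter (fun y => y ≠ x)).length ≤ n := by
        simp only [List.length_cons] at hl
        omega
      have hcx : ((x :: xs).count x : Int)
          = ((x :: xs).length : Int) - (((x :: xs).filter (fun z => z ≠ x)).length : Int) := by
        omega
      by_cases hcase : modeCount ((x :: xs).filter (fun y => y ≠ x))
          ≤ ((x :: xs).length : Int) - (((x :: xs).filter (fun y => y ≠ x)).length : Int)
      · refine ⟨x, List.mem_cons_self, ?_⟩
        rw [hcx, max_eq_left hcase]
      · push_neg at hcase
        rcases ih _ hlt with he | ⟨y, hy, hyc⟩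
        · rw [he] at hcase
          simp only [modeCount, List.length_nil] at hcase
          have : (0 : Int) ≤ ((x :: xs).length : Int) := by positivity
          omega
        · have hyx : y ≠ x := by
            have := List.mem_filter.mp hy
            simpa using this.2
          refine ⟨y, (List.mem_filter.mp hy).1, ?_⟩
          rw [← count_filter_ne x y hyx, hyc, max_eq_right (le_of_lt hcase)]

theorem modeCount_bound (l : List String) : ∀ y ∈ l, (l.count y : Int) ≤ modeCount l :=
  modeCount_bound' l.length l le_rfl

theorem modeCount_attained (l : List String) (h : l ≠ []) :
    ∃ y ∈ l, (l.count y : Int) = modeCount l :=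
  (modeCount_attained' l.length l le_rfl).resolve_left h

-- Per-group: A's contribution over one group equals tocni + B's mode count for that group.
theorem vecinskiRazred_group (razred : List String) (idx : List Int) (tocni : Int) :
    (match PySem.List.max? (PySem.Dict.counter
        (idx.foldl (fun acc k => acc ++ [PySem.List.pyGetD razred k ""]) [])).items
        (fun p => p.2) with
     | none => tocni
     | some m => idx.foldl (fun t i => if PySem.List.pyGetD razred i "" = m.1 then t + 1 else t) tocni)
    = tocni + modeCount (idx.map (fun k => PySem.List.pyGetD razred k "")) := by
  rw [PySem.List.foldl_append_singleton_eq_map, List.nil_append]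
  set temp := idx.map (fun k => PySem.List.pyGetD razred k "") with htemp
  rcases hmm : PySem.List.max? (PySem.Dict.counter temp).items (fun p => p.2) with _ | m
  · -- empty group: no items means temp = [], and modeCount [] = 0
    have hit := (PySem.List.max?_eq_none_iff _ _).mp hmm
    have htnil : temp = [] := by
      cases hte : temp with
      | nil => rfl
      | cons z zs =>
        exfalso
        have hz : z ∈ temp := by rw [hte]; exact List.mem_cons_self
        have : (z, (temp.count z : Int)) ∈ (PySem.Dict.counter temp).items := by
          rw [PySem.Dict.items_counter]
          exact List.mem_map.mpr ⟨z, (PySem.Set.mem_ofList _ _).mpr hz, rfl⟩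
        rw [hit] at this
        exact (List.not_mem_nil) this
    rw [htnil]
    simp [modeCount]
  · have hmem : m ∈ (PySem.Dict.counter temp).items := PySem.List.max?_mem hmm
    have hmax : ∀ y ∈ (PySem.Dict.counter temp).items, y.2 ≤ m.2 := PySem.List.max?_isMax hmm
    have hm1mem : m.1 ∈ temp := by
      rw [PySem.Dict.items_counter] at hmem
      obtain ⟨k, hk, he⟩ := List.mem_map.mp hmem
      have : m.1 = k := by rw [← he]
      rw [this]
      exact (PySem.Set.mem_ofList _ _).mp hk
    have hm2 : m.2 = (temp.count m.1 : Int) := by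
      rw [PySem.Dict.items_counter] at hmem
      obtain ⟨k, _, hk⟩ := List.mem_map.mp hmem
      have h1 : m.1 = k := by rw [← hk]
      have h2 : m.2 = (temp.count k : Int) := by rw [← hk]
      rw [h2, h1]
    -- A's rescan counts the occurrences of m.1 among the classes
    have hloop : idx.foldl (fun t i => if PySem.List.pyGetD razred i "" = m.1 then t + 1 else t) tocni
        = tocni + (temp.count m.1 : Int) := by
      rw [PySem.List.foldl_ite_add_one]
      congr 1
      rw [htemp, List.count_eq_countP, List.countP_map]
      rfl
    -- the counted multiplicity IS the mode count
    have hle : (temp.count m.1 : Int) ≤ modeCount temp := modeCount_bound temp m.1 hm1mem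
    have hge : modeCount temp ≤ (temp.count m.1 : Int) := by
      have htne : temp ≠ [] := by intro he; rw [he] at hm1mem; exact (List.not_mem_nil) hm1mem
      obtain ⟨y, hy, hyc⟩ := modeCount_attained temp htne
      have : ((y, (temp.count y : Int)) : String × Int) ∈ (PySem.Dict.counter temp).items := by
        rw [PySem.Dict.items_counter]
        exact List.mem_map.mpr ⟨y, (PySem.Set.mem_ofList _ _).mpr hy, rfl⟩
      rw [← hyc]
      simpa [hm2] using hmax _ this
    show List.foldl _ tocni idx = _
    rw [hloop, le_antisymm hle hge]

theorem vecinskiRazred_spec' (ji : List (String × List Int)) (razred : List String) :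
    vecinskiRazred ji razred = vecinskiRazred_alt ji razred := by
  unfold vecinskiRazred vecinskiRazred_alt
  induction ji using List.reverseRecOn with
  | nil => rfl
  | append_singleton gs g ih =>
    rw [List.foldl_append, List.foldl_append, ← ih,
        List.foldl_cons, List.foldl_nil, List.foldl_cons, List.foldl_nil]
    exact vecinskiRazred_group razred g.2 _

-- ===== VERDICT (by name: the statement is the Claim_ definition above) =====
theorem vecinskiRazred_spec : Claim_equal_vecinskiRazred := by
  intro ji razred _ _
  exact vecinskiRazred_spec' ji razred
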